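-- pv_equiv track=rewrite | github.com/btpozolo/PY110 | Problems/interview_prep.py | nearest_prime_sum
-- ===== SOURCE A (Python) =====
-- def nearest_prime_sum(int_list):
--     sum_list = sum(int_list)
--
--     next_prime = 0
--     curr_guess = sum_list + 1
--
--     while True:
--         for num in range(2, curr_guess):
--             if curr_guess % num == 0:
--                 curr_guess += 1
--                 continue
--             if num == curr_guess - 1:
--                 next_prime = curr_guess
--                 return next_prime - sum_list
-- ===== SOURCE B (Python) =====
-- def _is_prime(n):
--     if n < 2:
--         return False
--     d = 2
--     while d * d <= n:
--         if n % d == 0: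
--             return False
--         d += 1
--     return True
--
--
-- def nearest_prime_sum(int_list):
--     s = sum(int_list)
--     p = s + 1
--     while not _is_prime(p):
--         p += 1
--     return p - s
-- ===== Notes on version B (the rewrite author's own statement) =====
-- stated objective: alternative
-- what changed: A interleaves a quirky restartable trial-division sweep over range(2, guess) with guess increments happening mid-sweep; B separates concerns: a sqrt-bounded primality test (d*d <= n) and a plain next-prime scan from sum+1.
import Mathlib
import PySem

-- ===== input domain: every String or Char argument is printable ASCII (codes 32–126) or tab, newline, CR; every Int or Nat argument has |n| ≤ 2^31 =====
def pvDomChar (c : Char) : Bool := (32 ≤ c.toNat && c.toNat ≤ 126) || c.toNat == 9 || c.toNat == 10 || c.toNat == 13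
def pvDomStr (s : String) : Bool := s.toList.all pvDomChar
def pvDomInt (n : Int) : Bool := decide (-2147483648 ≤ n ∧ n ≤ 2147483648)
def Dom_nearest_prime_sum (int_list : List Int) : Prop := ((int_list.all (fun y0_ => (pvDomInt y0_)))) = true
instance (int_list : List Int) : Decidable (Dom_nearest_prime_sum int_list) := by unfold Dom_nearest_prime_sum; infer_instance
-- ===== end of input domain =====

-- B replaces A's restartable full trial-division sweep (which mutates the candidate mid-sweep) by a
-- sqrt-bounded primality test plus a plain next-prime scan; proved equal on Pre_ (sum ≥ 2).

-- ===== PORT A =====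
-- one `for num in range(2, curr_guess)` pass: `.inl v` = Python's `return next_prime - sum_list`,
-- `.inr g` = the pass ended and `while True` restarts with the current guess `g`
def nearestPassA (nums : List Int) (g s : Int) : Sum Int Int :=
  match nums with
  | [] => .inr g
  | num :: rest =>
      if PySem.Int.mod g num = 0 then nearestPassA rest (g + 1) s
      else if num = g - 1 then .inl (g - s)
      else nearestPassA rest g s

-- the `while True` loop; fuel is only a termination guard, proved sufficient on Pre_ (via Bertrand)
def nearestLoopA (fuel : Nat) (g s : Int) : Int :=
  match fuel with
  | 0 => 0
  | Nat.succ f =>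
      match nearestPassA (PySem.List.pyRange 2 g 1) g s with
      | .inl v => v
      | .inr g' => nearestLoopA f g' s

def nearest_prime_sum (int_list : List Int) : Int :=
  let s := int_list.sum
  nearestLoopA ((2 * (s + 1)).toNat + 2) (s + 1) s

-- ===== PORT B =====
-- the `while d * d <= n` loop of _is_prime; fuel is a termination guard (d reaches n + 1 at worst)
def trialDivB (fuel : Nat) (d n : Int) : Bool :=
  match fuel with
  | 0 => true
  | Nat.succ f =>
      if d * d ≤ n then
        if PySem.Int.mod n d = 0 then false else trialDivB f (d + 1) n
      else true

def isPrimeB (n : Int) : Bool :=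
  if n < 2 then false else trialDivB (n.toNat + 1) 2 n

-- the `while not _is_prime(p)` scan; fuel is a termination guard, sufficient on Pre_ (via Bertrand)
def scanB (fuel : Nat) (p s : Int) : Int :=
  match fuel with
  | 0 => 0
  | Nat.succ f => if isPrimeB p then p - s else scanB f (p + 1) s

def nearest_prime_sum_alt (int_list : List Int) : Int :=
  let s := int_list.sum
  scanB ((2 * (s + 1)).toNat + 2) (s + 1) s

-- ===== PRECONDITION & SPEC =====
-- Pre_ excludes sums ≤ 1, on which Python A loops forever (range(2, sum+1) is empty): A returns a value
-- exactly when the list's sum is at least 2.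
def Pre_nearest_prime_sum (int_list : List Int) : Prop := 2 ≤ int_list.sum
instance (int_list : List Int) : Decidable (Pre_nearest_prime_sum int_list) := by unfold Pre_nearest_prime_sum; infer_instance

def pvWitness_nearest_prime_sum : List Int := [2]

def Spec_nearest_prime_sum (int_list : List Int) (out : Int) : Prop := out = nearest_prime_sum_alt int_list
instance (int_list : List Int) (out : Int) : Decidable (Spec_nearest_prime_sum int_list out) := by unfold Spec_nearest_prime_sum; infer_instance

-- ===== CLAIM (what is proved, stated in full; the proofs are below) =====
def Claim_equal_nearest_prime_sum : Prop := ∀ (int_list : List Int), Dom_nearest_prime_sum int_list → Pre_nearest_prime_sum int_list → Spec_nearest_prime_sum int_list (nearest_prime_sum int_list)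

-- ===== LEMMAS AND PROOFS =====

-- "n is prime" phrased on Int, the way both loops see it
def PrimeI (n : Int) : Prop := 2 ≤ n ∧ ∀ d : Int, 2 ≤ d → d < n → ¬ d ∣ n

theorem trialDivB_eq_true_iff (n : Int) :
    ∀ (fuel : Nat) (d : Int), 2 ≤ d → (n + 1 - d).toNat ≤ fuel →
      (trialDivB fuel d n = true ↔ ∀ e : Int, d ≤ e → e * e ≤ n → ¬ e ∣ n) := by
  intro fuel
  induction fuel with
  | zero =>
      intro d hd hf
      simp only [trialDivB, true_iff]
      intro e he hee hdvd
      nlinarith [Int.toNat_of_nonneg (show (0:Int) ≤ n + 1 - d from by nlinarith), hf]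
  | succ f ih =>
      intro d hd hf
      by_cases hsq : d * d ≤ n
      · by_cases hdvd : d ∣ n
        · simp only [trialDivB, hsq, if_pos]
          rw [if_pos (by rwa [PySem.Int.mod_eq_zero_iff_dvd])]
          constructor
          · intro h; cases h
          · intro h; exact absurd hdvd (h d le_rfl hsq)
        · simp only [trialDivB, if_pos hsq]
          rw [if_neg (by rw [PySem.Int.mod_eq_zero_iff_dvd]; exact hdvd)]
          rw [ih (d + 1) (by omega) (by omega)]
          constructor
          · intro h e he hee
            rcases eq_or_lt_of_le he with rfl | hlt
            · exact hdvd
            · exact h e (by omega) hee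
          · intro h e he hee
            exact h e (by omega) hee
      · simp only [trialDivB, if_neg hsq, true_iff]
        intro e he hee hdvd
        nlinarith

theorem isPrimeB_eq_true_iff (n : Int) : isPrimeB n = true ↔ PrimeI n := by
  by_cases h2 : n < 2
  · simp only [isPrimeB, if_pos h2, PrimeI]
    constructor
    · intro h; cases h
    · intro h; omega
  · push_neg at h2
    simp only [isPrimeB, if_neg (not_lt.mpr h2)]
    rw [trialDivB_eq_true_iff n (n.toNat + 1) 2 (by omega) (by omega)]
    constructor
    · intro h
      refine ⟨h2, fun d hd hdn hdvd => ?_⟩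
      obtain ⟨k, hk⟩ := hdvd
      have hk2 : 2 ≤ k := by nlinarith
      rcases le_total d k with hdk | hkd
      · exact h d hd (by nlinarith) ⟨k, hk⟩
      · exact h k hk2 (by nlinarith) ⟨d, by rw [hk]; ring⟩
    · intro ⟨_, h⟩ e he hee hdvd
      exact h e he (by nlinarith) hdvd

theorem primeI_iff_natPrime (n : Int) (h2 : 2 ≤ n) : PrimeI n ↔ Nat.Prime n.toNat := by
  rw [Nat.prime_def_lt]
  constructor
  · intro ⟨_, h⟩
    refine ⟨by omega, fun m hm hdvd => ?_⟩
    by_contra hm1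
    have hm2 : 2 ≤ m := by
      rcases Nat.eq_zero_or_pos m with rfl | hp
      · simp at hdvd; omega
      · omega
    have : (m : Int) ∣ n := by
      have := Int.natCast_dvd_natCast.mpr hdvd
      rwa [Int.toNat_of_nonneg (by omega)] at this
    exact h (m : Int) (by exact_mod_cast hm2) (by omega) this
  · intro ⟨_, h⟩
    refine ⟨h2, fun d hd hdn hdvd => ?_⟩
    have hdnat : d.toNat ∣ n.toNat := by
      have : ((d.toNat : Int)) ∣ ((n.toNat : Int)) := by
        rwa [Int.toNat_of_nonneg (by omega), Int.toNat_of_nonneg (by omega)]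
      exact_mod_cast this
    have := h d.toNat (by omega) hdnat
    omega

theorem exists_least_primeI (g : Int) (hg : 3 ≤ g) :
    ∃ P : Int, PrimeI P ∧ g ≤ P ∧ P < 2 * g ∧ ∀ q : Int, g ≤ q → q < P → ¬ PrimeI q := by
  obtain ⟨p, hp, hp1, hp2⟩ := Nat.bertrand (g.toNat - 1) (by omega)
  have hex : ∃ k : Nat, g.toNat ≤ k ∧ Nat.Prime k := ⟨p, by omega, hp⟩
  classical
  obtain ⟨hP0le, hP0p⟩ := Nat.find_spec hex
  refine ⟨(Nat.find hex : Int), ?_, by omega, ?_, ?_⟩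
  · rw [primeI_iff_natPrime _ (by exact_mod_cast hP0p.two_le)]
    simpa using hP0p
  · have : Nat.find hex ≤ p := Nat.find_min' hex ⟨by omega, hp⟩
    omega
  · intro q hq1 hq2 hq
    have hq2' : 2 ≤ q := by omega
    have : Nat.Prime q.toNat := (primeI_iff_natPrime q hq2').mp hq
    have hlt : q.toNat < Nat.find hex := by omega
    exact Nat.find_min hex hlt ⟨by omega, this⟩

theorem nearestPassA_prime (g s : Int) (hg : 3 ≤ g) (hp : PrimeI g) :
    ∀ (k : Nat) (a : Int), 2 ≤ a → a ≤ g - 1 → (g - 1 - a).toNat ≤ k →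
      nearestPassA (PySem.List.pyRange a g 1) g s = .inl (g - s) := by
  intro k
  induction k with
  | zero =>
      intro a ha hag hk
      have hag' : a = g - 1 := by omega
      rw [PySem.List.pyRange_one_cons (by omega)]
      simp only [nearestPassA]
      rw [if_neg (by rw [PySem.Int.mod_eq_zero_iff_dvd]; exact hp.2 a ha (by omega))]
      rw [if_pos hag']
  | succ m ih =>
      intro a ha hag hk
      rw [PySem.List.pyRange_one_cons (by omega)]
      simp only [nearestPassA]
      rw [if_neg (by rw [PySem.Int.mod_eq_zero_iff_dvd]; exact hp.2 a ha (by omega))]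
      by_cases hlast : a = g - 1
      · rw [if_pos hlast]
      · rw [if_neg hlast]
        exact ih (a + 1) (by omega) (by omega) (by omega)

theorem nearestPassA_progress (s g0 P : Int) (hP : PrimeI P) (hg0 : g0 ≤ P) :
    ∀ nums : List Int, (∀ n ∈ nums, 2 ≤ n ∧ n ≤ g0 - 1) →
    ∀ g1 : Int, g0 + 1 ≤ g1 → g1 ≤ P →
      ∃ g2, nearestPassA nums g1 s = .inr g2 ∧ g1 ≤ g2 ∧ g2 ≤ P := by
  intro nums
  induction nums with
  | nil => intro _ g1 _ h; exact ⟨g1, rfl, le_rfl, h⟩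
  | cons num rest ih =>
      intro hmem g1 hg1 hg1P
      obtain ⟨hn2, hng0⟩ := hmem num (List.mem_cons_self ..)
      have hrest := fun n hn => hmem n (List.mem_cons_of_mem _ hn)
      simp only [nearestPassA]
      by_cases hdvd : num ∣ g1
      · have hg1lt : g1 < P := by
          rcases eq_or_lt_of_le hg1P with rfl | h
          · exact absurd hdvd (hP.2 num hn2 (by omega))
          · exact h
        rw [if_pos (by rwa [PySem.Int.mod_eq_zero_iff_dvd])]
        obtain ⟨g2, heq, hle, hle'⟩ := ih hrest (g1 + 1) (by omega) (by omega)
        exact ⟨g2, heq, by omega, hle'⟩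
      · rw [if_neg (by rw [PySem.Int.mod_eq_zero_iff_dvd]; exact hdvd)]
        rw [if_neg (by omega)]
        exact ih hrest g1 hg1 hg1P

theorem nearestPassA_seek (s g P : Int) (hg : 3 ≤ g) (hgP : g ≤ P) (hP : PrimeI P) :
    ∀ (k : Nat) (a : Int), 2 ≤ a → a ≤ g - 1 → (g - 1 - a).toNat ≤ k →
    (∃ d : Int, a ≤ d ∧ d < g ∧ d ∣ g) →
      ∃ g', nearestPassA (PySem.List.pyRange a g 1) g s = .inr g' ∧ g < g' ∧ g' ≤ P := by
  intro k
  induction k with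
  | zero =>
      intro a ha hag hk ⟨d, hd1, hd2, hd3⟩
      have hag' : a = g - 1 := by omega
      have hda : d = a := by omega
      subst hda
      have hglt : g < P := by
        rcases eq_or_lt_of_le hgP with rfl | h
        · exact absurd hd3 (hP.2 d ha hd2)
        · exact h
      rw [PySem.List.pyRange_one_cons (by omega)]
      simp only [nearestPassA]
      rw [if_pos (by rwa [PySem.Int.mod_eq_zero_iff_dvd])]
      rw [PySem.List.pyRange_one_eq_nil (by omega)]
      exact ⟨g + 1, rfl, by omega, by omega⟩
  | succ m ih =>
      intro a ha hag hk ⟨d, hd1, hd2, hd3⟩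
      rw [PySem.List.pyRange_one_cons (by omega)]
      simp only [nearestPassA]
      by_cases hdvd : a ∣ g
      · have hglt : g < P := by
          rcases eq_or_lt_of_le hgP with rfl | h
          · exact absurd hdvd (hP.2 a ha (by omega))
          · exact h
        rw [if_pos (by rwa [PySem.Int.mod_eq_zero_iff_dvd])]
        obtain ⟨g2, heq, hle, hle'⟩ :=
          nearestPassA_progress s g P hP hgP (PySem.List.pyRange (a + 1) g 1)
            (fun n hn => by
              rw [PySem.List.mem_pyRange_one] at hn
              omega)
            (g + 1) (by omega) (by omega)
        exact ⟨g2, heq, by omega, hle'⟩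
      · have hda : d ≠ a := fun h => hdvd (h ▸ hd3)
        have hlast : a ≠ g - 1 := by
          intro h
          have : d = a := by omega
          exact hda this
        rw [if_neg (by rw [PySem.Int.mod_eq_zero_iff_dvd]; exact hdvd)]
        rw [if_neg hlast]
        exact ih (a + 1) (by omega) (by omega) (by omega) ⟨d, by omega, hd2, hd3⟩

theorem nearestLoopA_eq (s P : Int) (hP : PrimeI P) :
    ∀ (fuel : Nat) (g : Int), 3 ≤ g → g ≤ P → (∀ q : Int, g ≤ q → q < P → ¬ PrimeI q) →
      (P - g).toNat < fuel → nearestLoopA fuel g s = P - s := by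
  intro fuel
  induction fuel with
  | zero => intro g _ _ _ h; omega
  | succ f ih =>
      intro g hg hgP hmin hfuel
      by_cases hpg : PrimeI g
      · have hgeq : g = P := by
          rcases eq_or_lt_of_le hgP with rfl | h
          · rfl
          · exact absurd hpg (hmin g le_rfl h)
        simp only [nearestLoopA]
        rw [nearestPassA_prime g s hg hpg ((g - 1 - 2).toNat) 2 le_rfl (by omega) le_rfl]
        rw [hgeq]
      · have hglt : g < P := by
          rcases eq_or_lt_of_le hgP with rfl | h
          · exact absurd hP hpg
          · exact h
        have hdiv : ∃ d : Int, 2 ≤ d ∧ d < g ∧ d ∣ g := by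
          by_contra hcon
          push_neg at hcon
          exact hpg ⟨by omega, fun d h1 h2 => hcon d h1 h2⟩
        obtain ⟨d, hd1, hd2, hd3⟩ := hdiv
        obtain ⟨g', heq, hgg', hg'P⟩ :=
          nearestPassA_seek s g P hg hgP hP ((g - 1 - 2).toNat) 2 le_rfl (by omega) le_rfl
            ⟨d, hd1, hd2, hd3⟩
        simp only [nearestLoopA]
        rw [heq]
        exact ih g' (by omega) hg'P (fun q hq1 hq2 => hmin q (by omega) hq2) (by omega)

theorem scanB_eq (s P : Int) (hP : PrimeI P) :
    ∀ (fuel : Nat) (p : Int), 2 ≤ p → p ≤ P → (∀ q : Int, p ≤ q → q < P → ¬ PrimeI q) →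
      (P - p).toNat < fuel → scanB fuel p s = P - s := by
  intro fuel
  induction fuel with
  | zero => intro p _ _ _ h; omega
  | succ f ih =>
      intro p hp hpP hmin hfuel
      by_cases hpr : PrimeI p
      · have hpeq : p = P := by
          rcases eq_or_lt_of_le hpP with rfl | h
          · rfl
          · exact absurd hpr (hmin p le_rfl h)
        simp only [scanB]
        rw [if_pos ((isPrimeB_eq_true_iff p).mpr hpr), hpeq]
      · have hplt : p < P := by
          rcases eq_or_lt_of_le hpP with rfl | h
          · exact absurd hP hpr
          · exact h
        simp only [scanB]
        rw [if_neg (fun h => hpr ((isPrimeB_eq_true_iff p).mp h))]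
        exact ih (p + 1) (by omega) (by omega) (fun q hq1 hq2 => hmin q (by omega) hq2) (by omega)

-- ===== VERDICT (by name: the statement is the Claim_ definition above) =====
theorem nearest_prime_sum_spec : Claim_equal_nearest_prime_sum := by
  intro int_list _ hpre
  unfold Spec_nearest_prime_sum nearest_prime_sum nearest_prime_sum_alt
  have hpre' : 2 ≤ int_list.sum := hpre
  set s := int_list.sum with hs
  obtain ⟨P, hP, hge, hlt, hmin⟩ := exists_least_primeI (s + 1) (by omega)
  rw [nearestLoopA_eq s P hP _ (s + 1) (by omega) hge hmin (by omega)]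
  rw [scanB_eq s P hP _ (s + 1) (by omega) hge hmin (by omega)]
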